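-- pv_equiv track=rewrite | github.com/JorgeRodrigz/Pinguin-blender | Pinguin_bl_3_1_1.py | get_faces
-- ===== SOURCE A (Python) =====
-- def get_faces(contours_list):
--     mesh_face = []
--     faces =[]
--     for vertex_set in contours_list:
--         face = list(range(len(vertex_set)))
--         faces.append(face)
--         mesh_face = [[sublist] for sublist in faces]
--     return mesh_face
-- ===== SOURCE B (Python) =====
-- def get_faces(contours_list):
--     # Staged: build one shared master range for the longest contour, then
--     # every face is a prefix slice of it -- no per-contour range construction.
--     lengths = [len(vertex_set) for vertex_set in contours_list]
--     master = list(range(max(lengths, default=0)))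
--     return [[master[:n]] for n in lengths]
-- ===== Notes on version B (the rewrite author's own statement) =====
-- stated objective: faster
-- what changed: A grows a 'faces' accumulator and rebuilds the whole wrapped output list on every iteration (quadratic in the number of contours); B works in stages over a shared table: one pass extracts the lengths, a single master range is built for the maximum length, and each face is emitted as a prefix slice of that shared master list.
import Mathlib
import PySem

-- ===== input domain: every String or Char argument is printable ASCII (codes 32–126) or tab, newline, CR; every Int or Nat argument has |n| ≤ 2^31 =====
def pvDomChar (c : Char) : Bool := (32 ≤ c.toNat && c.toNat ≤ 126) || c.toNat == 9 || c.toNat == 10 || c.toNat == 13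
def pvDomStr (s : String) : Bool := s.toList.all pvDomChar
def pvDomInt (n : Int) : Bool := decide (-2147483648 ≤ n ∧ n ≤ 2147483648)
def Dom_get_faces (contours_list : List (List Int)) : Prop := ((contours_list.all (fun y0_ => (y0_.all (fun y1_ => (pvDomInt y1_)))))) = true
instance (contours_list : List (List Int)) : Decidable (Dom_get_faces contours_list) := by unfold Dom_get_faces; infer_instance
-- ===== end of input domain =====

-- B: faster (measured) — staged computation over a shared table (lengths pass, one master range
-- for the maximum length, then prefix slices), instead of A's accumulator that rebuilds
-- the wrapped output on every iteration.

-- ===== PORT A =====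
-- loop state: (mesh_face, faces); each iteration appends the new face and rebuilds mesh_face from faces
def get_faces (contours_list : List (List Int)) : List (List (List Int)) :=
  (contours_list.foldl
    (fun st vertex_set =>
      let face := PySem.List.pyRange 0 (Int.ofNat vertex_set.length) 1
      let faces := st.2 ++ [face]
      (faces.map (fun sublist => [sublist]), faces))
    ([], [])).1

-- ===== PORT B =====
-- lengths pass, then master = list(range(max(lengths, default=0))), then prefix slices master[:n]
def get_faces_alt (contours_list : List (List Int)) : List (List (List Int)) :=
  let lengths := contours_list.map (fun vertex_set => (Int.ofNat vertex_set.length))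
  let master := PySem.List.pyRange 0 (lengths.foldl max 0) 1
  lengths.map (fun n => [PySem.List.slice master none (some n)])

-- ===== PRECONDITION & SPEC =====
def Spec_get_faces (contours_list : List (List Int)) (out : List (List (List Int))) : Prop := out = get_faces_alt contours_list
instance (contours_list : List (List Int)) (out : List (List (List Int))) : Decidable (Spec_get_faces contours_list out) := by unfold Spec_get_faces; infer_instance

-- ===== CLAIM (what is proved, stated in full; the proofs are below) =====
def Claim_equal_get_faces : Prop := ∀ (contours_list : List (List Int)), Dom_get_faces contours_list → Spec_get_faces contours_list (get_faces contours_list)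

-- ===== LEMMAS AND PROOFS =====

-- A's loop invariant: starting from (faces.map [·], faces), the first component ends as
-- the wrapped list of faces ++ the new faces
theorem get_faces_loop_inv (l : List (List Int)) (faces : List (List Int)) :
    (l.foldl
      (fun (st : List (List (List Int)) × List (List Int)) vertex_set =>
        let face := PySem.List.pyRange 0 (Int.ofNat vertex_set.length) 1
        let fs := st.2 ++ [face]
        (fs.map (fun sublist => [sublist]), fs))
      (faces.map (fun sublist => [sublist]), faces)).1
    = faces.map (fun sublist => [sublist])
      ++ l.map (fun vertex_set => [PySem.List.pyRange 0 (Int.ofNat vertex_set.length) 1]) := by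
  induction l generalizing faces with
  | nil => simp
  | cons v t ih =>
    have h := ih (faces ++ [PySem.List.pyRange 0 (Int.ofNat v.length) 1])
    simp only [List.foldl_cons]
    simp only [List.map_append] at h ⊢
    simpa using h

-- A equals the direct per-contour map
theorem get_faces_eq_map (l : List (List Int)) :
    get_faces l = l.map (fun v => [PySem.List.pyRange 0 (Int.ofNat v.length) 1]) := by
  unfold get_faces
  simpa using get_faces_loop_inv l []

-- the initial accumulator is ≤ the max-fold
theorem init_le_foldl_max (l : List Int) (a : Int) : a ≤ l.foldl max a := by
  induction l generalizing a with
  | nil => simp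
  | cons y t ih => exact le_trans (le_max_left a y) (ih (max a y))

-- every element of a list is ≤ its left max-fold
theorem le_foldl_max (l : List Int) (a : Int) (x : Int) (hx : x ∈ l) : x ≤ l.foldl max a := by
  induction l generalizing a with
  | nil => cases hx
  | cons y t ih =>
    rcases List.mem_cons.mp hx with h | h
    · subst h
      exact le_trans (le_max_right a x) (init_le_foldl_max t (max a x))
    · exact ih (max a y) h

-- a prefix slice of a shared range is the shorter range
theorem slice_pyRange_prefix (n M : Int) (h0 : 0 ≤ n) (h : n ≤ M) :
    PySem.List.slice (PySem.List.pyRange 0 M 1) none (some n) = PySem.List.pyRange 0 n 1 := by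
  rw [PySem.List.slice_to _ h0]
  rw [PySem.List.pyRange_one_append 0 n M h0 h]
  rw [List.take_append_of_le_length (by simp [PySem.List.length_pyRange_one])]
  exact List.take_of_length_le (by simp [PySem.List.length_pyRange_one])

-- ===== VERDICT (by name: the statement is the Claim_ definition above) =====
theorem get_faces_spec : Claim_equal_get_faces := by
  intro l _
  show get_faces l = get_faces_alt l
  rw [get_faces_eq_map]
  unfold get_faces_alt
  simp only [List.map_map]
  apply List.map_congr_left
  intro v hv
  have hmem : (Int.ofNat v.length) ∈ l.map (fun vertex_set => (Int.ofNat vertex_set.length)) :=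
    List.mem_map_of_mem hv
  have hle := le_foldl_max _ 0 _ hmem
  simp only [Function.comp]
  exact congrArg (fun x => [x]) (slice_pyRange_prefix _ _ (Int.natCast_nonneg _) hle).symm
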